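-- pv_equiv track=rewrite | github.com/david-thybert/dt-positive_selection | scripts/combine_pos_sell_info_brst.py | map_inputs
-- ===== SOURCE A (Python) =====
-- def map_inputs(tsvs:list, sat_substs:list)-> dict:
--     """
--     This function map together json file and saturation of substitution file
--
--     :param jsons: list of json fles
--     :param sat_substs: list of saturaiton of substitution files
--     :return: Dictionary that map json file tot he corresponding saturations substtitution file
--     """
--     dico_result = {}
--     for tsv in tsvs:
--         id_tsv = tsv.split("/")[-1].split(".pml")[0]
--         for sta_subst in sat_substs:
--             id_sta_subst = sta_subst.split("/")[-1].split(".nuc")[0]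
--             if id_tsv == id_sta_subst:
--                 dico_result[id_tsv] = [tsv, sta_subst]
--     return dico_result
-- ===== SOURCE B (Python) =====
-- def map_inputs(tsvs: list, sat_substs: list) -> dict:
--     sat_by_id = {}
--     for s in sat_substs:
--         sat_by_id[s.split("/")[-1].split(".nuc")[0]] = s
--     tsv_by_id = {}
--     for t in tsvs:
--         tsv_by_id[t.split("/")[-1].split(".pml")[0]] = t
--     return {i: [t, sat_by_id[i]] for i, t in tsv_by_id.items() if i in sat_by_id}
-- ===== Notes on version B (the rewrite author's own statement) =====
-- stated objective: faster
-- what changed: Replaces A's nested scan of sat_substs for every tsv by two id-keyed dictionaries built in one pass each, joined by a single pass over the tsv table's items (both dicts last-wins, preserving A's overwrite and insertion-order semantics).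
import Mathlib
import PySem

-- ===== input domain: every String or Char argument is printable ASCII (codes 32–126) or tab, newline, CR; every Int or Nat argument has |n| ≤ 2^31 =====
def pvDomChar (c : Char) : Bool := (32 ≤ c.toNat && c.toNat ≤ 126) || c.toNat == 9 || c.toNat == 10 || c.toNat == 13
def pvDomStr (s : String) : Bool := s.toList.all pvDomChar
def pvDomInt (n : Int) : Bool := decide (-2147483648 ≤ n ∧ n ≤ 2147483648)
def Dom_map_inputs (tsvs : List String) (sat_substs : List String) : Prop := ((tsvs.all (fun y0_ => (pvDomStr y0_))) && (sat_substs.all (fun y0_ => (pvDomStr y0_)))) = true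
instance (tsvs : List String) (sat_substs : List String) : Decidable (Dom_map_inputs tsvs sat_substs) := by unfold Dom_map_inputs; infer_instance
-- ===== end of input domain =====

-- B replaces A's nested scan by two id-keyed dictionaries built in single passes and one
-- pass over the tsv table (objective: faster, O(n*m) -> O(n+m); same results, same order).

-- ===== PORT A =====
-- shared id extraction s.split("/")[-1].split(sep)[0] (identical expressions in both
-- Pythons): str.split with a non-empty separator never returns none and always yields a
-- non-empty list, so getD [] / getLastD "" / headD "" are exact here.
def pvIdOf (sep : String) (s : String) : String :=
  (((PySem.Str.split? (((PySem.Str.split? s "/").getD []).getLastD "") sep).getD []).headD "")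

def map_inputs (tsvs : List String) (sat_substs : List String) : List (String × List String) :=
  (tsvs.foldl (fun dico_result tsv =>
      let id_tsv := pvIdOf ".pml" tsv
      sat_substs.foldl (fun dico_result sta_subst =>
          let id_sta_subst := pvIdOf ".nuc" sta_subst
          if id_tsv = id_sta_subst then dico_result.insert id_tsv [tsv, sta_subst]
          else dico_result)
        dico_result)
    PySem.Dict.empty).items

-- ===== PORT B =====
def map_inputs_alt (tsvs : List String) (sat_substs : List String) : List (String × List String) :=
  let sat_by_id : PySem.Dict String String :=
    sat_substs.foldl (fun d s => d.insert (pvIdOf ".nuc" s) s) PySem.Dict.empty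
  let tsv_by_id : PySem.Dict String String :=
    tsvs.foldl (fun d t => d.insert (pvIdOf ".pml" t) t) PySem.Dict.empty
  -- the dict comprehension: tsv_by_id's keys are distinct, so its items are exactly this
  -- list; sat_by_id[i] is guarded by the membership test, so getD's default is never used
  (tsv_by_id.items.filter (fun p => sat_by_id.contains p.1)).map
    (fun p => (p.1, [p.2, sat_by_id.getD p.1 ""]))

-- ===== PRECONDITION & SPEC =====
def Spec_map_inputs (tsvs : List String) (sat_substs : List String) (out : List (String × List String)) : Prop := out = map_inputs_alt tsvs sat_substs
instance (tsvs : List String) (sat_substs : List String) (out : List (String × List String)) : Decidable (Spec_map_inputs tsvs sat_substs out) := by unfold Spec_map_inputs; infer_instance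

-- ===== CLAIM (what is proved, stated in full; the proofs are below) =====
def Claim_equal_map_inputs : Prop := ∀ (tsvs : List String) (sat_substs : List String), Dom_map_inputs tsvs sat_substs → Spec_map_inputs tsvs sat_substs (map_inputs tsvs sat_substs)

-- ===== LEMMAS AND PROOFS =====
-- proof-only canonical form both ports are reduced to: tsv ids in first-occurrence order,
-- kept iff some sat file shares the id, paired with the LAST tsv and LAST sat with that id
def pvCanon (tsvs : List String) (sat_substs : List String) : List (String × List String) :=
  ((PySem.List.dedup (tsvs.map (pvIdOf ".pml"))).filter
      (fun i => ((sat_substs.filter (fun s => pvIdOf ".nuc" s == i)).getLast?).isSome)).map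
    (fun i => (i, [(tsvs.filter (fun t => pvIdOf ".pml" t == i)).getLastD "",
                   (sat_substs.filter (fun s => pvIdOf ".nuc" s == i)).getLastD ""]))

theorem dedup_append_singleton (l : List String) (x : String) :
    PySem.List.dedup (l ++ [x])
      = if x ∈ l then PySem.List.dedup l else PySem.List.dedup l ++ [x] := by
  simp [PySem.List.dedup_eq_ofList, PySem.Set.ofList_append, PySem.Set.update_cons,
    PySem.Set.update_nil, PySem.Set.add]


theorem inner_loop_eq (sats : List String) (d : PySem.Dict String (List String))
    (i t : String) :
    sats.foldl (fun dr s => if i = pvIdOf ".nuc" s then dr.insert i [t, s] else dr) d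
      = match (sats.filter (fun s => pvIdOf ".nuc" s == i)).getLast? with
        | none => d
        | some s => d.insert i [t, s] := by
  induction sats using List.reverseRecOn generalizing d with
  | nil => rfl
  | append_singleton l s ih =>
    simp only [List.foldl_append, List.foldl, List.filter_append]
    by_cases h : i = pvIdOf ".nuc" s
    · have hb : (pvIdOf ".nuc" s == i) = true := by simp [h]
      simp only [if_pos h, List.filter_cons, List.filter_nil, hb, if_true, ih]
      rw [List.getLast?_append]
      cases hl : (l.filter (fun s => pvIdOf ".nuc" s == i)).getLast? <;>
        simp [PySem.Dict.insert_insert_self]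
    · have hb : (pvIdOf ".nuc" s == i) = false := by
        simp; exact fun e => h e.symm
      simp only [if_neg h, List.filter_cons, List.filter_nil, hb, ih]
      simp


theorem A_dict_eq (tsvs sats : List String) :
    tsvs.foldl (fun dico_result tsv =>
      let id_tsv := pvIdOf ".pml" tsv
      sats.foldl (fun dico_result sta_subst =>
          let id_sta_subst := pvIdOf ".nuc" sta_subst
          if id_tsv = id_sta_subst then dico_result.insert id_tsv [tsv, sta_subst]
          else dico_result)
        dico_result)
      PySem.Dict.empty = PySem.Dict.mk (pvCanon tsvs sats) := by
  induction tsvs using List.reverseRecOn with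
  | nil => rfl
  | append_singleton ts t ih =>
    simp only [List.foldl_append, List.foldl, ih]
    rw [inner_loop_eq]
    set i := pvIdOf ".pml" t with hi
    have hcongr : ∀ (L : List String), (∀ j ∈ L, j ≠ i) →
        L.map (fun j => (j, [(ts.filter (fun t => pvIdOf ".pml" t == j)).getLastD "",
            (sats.filter (fun s => pvIdOf ".nuc" s == j)).getLastD ""]))
        = L.map (fun j => (j, [((ts ++ [t]).filter (fun t => pvIdOf ".pml" t == j)).getLastD "",
            (sats.filter (fun s => pvIdOf ".nuc" s == j)).getLastD ""])) := by
      intro L hL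
      apply List.map_congr_left
      intro j hj
      have hb : (pvIdOf ".pml" t == j) = false := by
        simp [hi]; exact fun e => hL j hj e.symm
      simp [List.filter_append, hb]
    cases hs : (sats.filter (fun s => pvIdOf ".nuc" s == i)).getLast? with
    | none =>
      apply PySem.Dict.ext
      show pvCanon ts sats = pvCanon (ts ++ [t]) sats
      unfold pvCanon
      rw [List.map_append]
      simp only [List.map_cons, List.map_nil, ← hi]
      rw [dedup_append_singleton]
      by_cases hm : i ∈ ts.map (pvIdOf ".pml")
      · rw [if_pos hm]
        apply hcongr
        intro j hj e
        subst e
        simp only [List.mem_filter, hs] at hj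
        simp at hj
      · rw [if_neg hm, List.filter_append, List.filter_cons, List.filter_nil, hs]
        simp only [Option.isSome_none, Bool.false_eq_true, if_false, List.append_nil]
        apply hcongr
        intro j hj e
        subst e
        exact hm ((PySem.List.mem_dedup _ _).mp (List.mem_of_mem_filter hj))
    | some s =>
      apply PySem.Dict.ext
      have hlastT : ((ts ++ [t]).filter (fun x => pvIdOf ".pml" x == i)).getLastD "" = t := by
        rw [List.filter_append]
        simp [← hi]
      have hlastS : (sats.filter (fun s => pvIdOf ".nuc" s == i)).getLastD "" = s := by
        rw [List.getLastD_eq_getLast?, hs]; rfl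
      rw [PySem.Dict.items_insert]
      by_cases hm : i ∈ ts.map (pvIdOf ".pml")
      · have hc : (PySem.Dict.mk (pvCanon ts sats)).contains i = true := by
          rw [PySem.Dict.contains_mk]
          unfold pvCanon
          simp only [List.any_map, List.any_filter]
          rw [List.any_eq_true]
          exact ⟨i, (PySem.List.mem_dedup _ _).mpr hm, by simp [hs]⟩
        rw [if_pos hc]
        show (pvCanon ts sats).map _ = pvCanon (ts ++ [t]) sats
        unfold pvCanon
        rw [List.map_append]
        simp only [List.map_cons, List.map_nil, ← hi]
        rw [dedup_append_singleton, if_pos hm, List.map_map]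
        apply List.map_congr_left
        intro j hj
        by_cases hji : j = i
        · subst hji
          simp only [Function.comp, beq_self_eq_true, if_true, Prod.mk.injEq, true_and]
          rw [hlastT, hlastS]
        · have hb : (j == i) = false := by simp [hji]
          have hbt : (pvIdOf ".pml" t == j) = false := by
            simp [hi]; exact fun e => hji e.symm
          simp only [Function.comp, hb]
          simp [List.filter_append, hbt]
      · have hc : (PySem.Dict.mk (pvCanon ts sats)).contains i = false := by
          rw [PySem.Dict.contains_mk]
          unfold pvCanon
          simp only [List.any_map, List.any_filter]
          rw [List.any_eq_false]
          intro j hj hcontra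
          simp only [Bool.and_eq_true] at hcontra
          have hji : j = i := by simpa using hcontra.2
          rw [← hji] at hm
          exact hm ((PySem.List.mem_dedup _ _).mp hj)
        rw [if_neg (by simp [hc])]
        show pvCanon ts sats ++ [(i, [t, s])] = pvCanon (ts ++ [t]) sats
        unfold pvCanon
        rw [List.map_append]
        simp only [List.map_cons, List.map_nil, ← hi]
        rw [dedup_append_singleton, if_neg hm, List.filter_append]
        simp only [List.filter_cons, List.filter_nil, hs, Option.isSome_some, if_true]
        rw [List.map_append]
        congr 1
        · apply hcongr
          intro j hj e
          subst e
          exact hm ((PySem.List.mem_dedup _ _).mp (List.mem_of_mem_filter hj))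
        · simp only [List.map_cons, List.map_nil]
          rw [hlastT, hlastS]

theorem get?_build (key : String → String) (l : List String) (d : PySem.Dict String String)
    (i : String) :
    (l.foldl (fun d s => d.insert (key s) s) d).get? i
      = ((l.filter (fun s => key s == i)).getLast?).or (d.get? i) := by
  induction l using List.reverseRecOn generalizing d with
  | nil => simp
  | append_singleton l s ih =>
    simp only [List.foldl_append, List.foldl, List.filter_append, List.filter_cons,
      List.filter_nil]
    rw [PySem.Dict.get?_insert, ih]
    by_cases h : i = key s
    · simp [h]
    · have hb : (key s == i) = false := by simp; exact fun e => h e.symm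
      simp [hb, h]


theorem B_eq_canon (tsvs sats : List String) :
    map_inputs_alt tsvs sats = pvCanon tsvs sats := by
  show (((tsvs.foldl (fun d t => d.insert (pvIdOf ".pml" t) t) PySem.Dict.empty).items.filter (fun p => (sats.foldl (fun d s => d.insert (pvIdOf ".nuc" s) s) PySem.Dict.empty).contains p.1)).map (fun p => (p.1, [p.2, (sats.foldl (fun d s => d.insert (pvIdOf ".nuc" s) s) PySem.Dict.empty).getD p.1 ""]))) = pvCanon tsvs sats
  have hnd : (tsvs.foldl (fun d t => d.insert (pvIdOf ".pml" t) t) PySem.Dict.empty).keys.Nodup :=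
    PySem.Dict.nodup_keys_foldl_insert_key tsvs _ _ _ PySem.Dict.nodup_keys_empty
  rw [PySem.Dict.items_eq_map_keys _ hnd ""]
  rw [PySem.Dict.keys_foldl_insert_key, PySem.Dict.keys_empty, PySem.Set.update_nil_left,
    ← PySem.List.dedup_eq_ofList]
  rw [List.filter_map, List.map_map]
  unfold pvCanon
  have hcond : ∀ j : String,
      ((sats.foldl (fun d s => d.insert (pvIdOf ".nuc" s) s) PySem.Dict.empty).contains j)
        = ((sats.filter (fun s => pvIdOf ".nuc" s == j)).getLast?).isSome := by
    intro j
    rw [PySem.Dict.contains_eq_isSome_get?, get?_build]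
    simp
  have hfc : (List.filter ((fun p => ((sats.foldl (fun d s => d.insert (pvIdOf ".nuc" s) s) PySem.Dict.empty).contains p.1)) ∘ (fun k => (k, (tsvs.foldl (fun d t => d.insert (pvIdOf ".pml" t) t) PySem.Dict.empty).getD k ""))) (PySem.List.dedup (tsvs.map (pvIdOf ".pml"))))
      = (PySem.List.dedup (tsvs.map (pvIdOf ".pml"))).filter (fun i => ((sats.filter (fun s => pvIdOf ".nuc" s == i)).getLast?).isSome) := by
    apply List.filter_congr
    intro j _
    simp only [Function.comp]
    exact hcond j
  rw [hfc]
  apply List.map_congr_left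
  intro j hj
  simp only [Function.comp]
  have hjm : j ∈ tsvs.map (pvIdOf ".pml") :=
    (PySem.List.mem_dedup _ _).mp (List.mem_of_mem_filter hj)
  have hget : (tsvs.foldl (fun d t => d.insert (pvIdOf ".pml" t) t) PySem.Dict.empty).getD j ""
      = (tsvs.filter (fun t => pvIdOf ".pml" t == j)).getLastD "" := by
    rw [PySem.Dict.getD_eq_get?_getD, get?_build]
    rw [List.getLastD_eq_getLast?]
    simp
  have hsat : (sats.foldl (fun d s => d.insert (pvIdOf ".nuc" s) s) PySem.Dict.empty).getD j ""
      = (sats.filter (fun s => pvIdOf ".nuc" s == j)).getLastD "" := by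
    rw [PySem.Dict.getD_eq_get?_getD, get?_build]
    rw [List.getLastD_eq_getLast?]
    simp
  rw [hget, hsat]

-- ===== VERDICT (by name: the statement is the Claim_ definition above) =====
theorem map_inputs_spec : Claim_equal_map_inputs := by
  intro tsvs sats _
  show map_inputs tsvs sats = map_inputs_alt tsvs sats
  rw [map_inputs, A_dict_eq, B_eq_canon]
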